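-- pv_equiv track=rewrite | github.com/drothermel/dr_gen | src/dr_gen/analyze/result_parsing.py | get_inds_by_kvs
-- ===== SOURCE A (Python) =====
-- def get_inds_by_kvs(key_order, combo_inds, kv_select):
--     selected_rows = list(combo_inds.keys())
--     name_to_ind = {k: i for i, k in enumerate(key_order)}
--     for k, v in kv_select.items():
--         # Can't control keys that aren't swept
--         if k not in key_order:
--             continue
--         key_ind = name_to_ind[k]
--         selected_rows = [
--             sr for sr in selected_rows if sr[key_ind] == v
--         ]
--     return {sr: combo_inds[sr] for sr in selected_rows}
-- ===== SOURCE B (Python) =====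
-- def get_inds_by_kvs(key_order, combo_inds, kv_select):
--     name_to_ind = {k: i for i, k in enumerate(key_order)}
--     constraints = [(name_to_ind[k], v) for k, v in kv_select.items() if k in name_to_ind]
--     return {
--         row: inds
--         for row, inds in combo_inds.items()
--         if all(row[i] == v for i, v in constraints)
--     }
-- ===== Notes on version B (the rewrite author's own statement) =====
-- stated objective: simpler
-- what changed: A filters the row list once per kv_select constraint (N sequential passes, each rescanning the survivors) and then rebuilds the dict by lookup; B precomputes the (key_index, value) constraint list and keeps each (row, inds) item in a single pass over combo_inds.items() checking all constraints at once.
-- outside the precondition, e.g. on get_inds_by_kvs(['a', 'b'], {('x',): [1]}, {'a': 'y', 'b': 'z'}): A returns {}, B returns {}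
import Mathlib
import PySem

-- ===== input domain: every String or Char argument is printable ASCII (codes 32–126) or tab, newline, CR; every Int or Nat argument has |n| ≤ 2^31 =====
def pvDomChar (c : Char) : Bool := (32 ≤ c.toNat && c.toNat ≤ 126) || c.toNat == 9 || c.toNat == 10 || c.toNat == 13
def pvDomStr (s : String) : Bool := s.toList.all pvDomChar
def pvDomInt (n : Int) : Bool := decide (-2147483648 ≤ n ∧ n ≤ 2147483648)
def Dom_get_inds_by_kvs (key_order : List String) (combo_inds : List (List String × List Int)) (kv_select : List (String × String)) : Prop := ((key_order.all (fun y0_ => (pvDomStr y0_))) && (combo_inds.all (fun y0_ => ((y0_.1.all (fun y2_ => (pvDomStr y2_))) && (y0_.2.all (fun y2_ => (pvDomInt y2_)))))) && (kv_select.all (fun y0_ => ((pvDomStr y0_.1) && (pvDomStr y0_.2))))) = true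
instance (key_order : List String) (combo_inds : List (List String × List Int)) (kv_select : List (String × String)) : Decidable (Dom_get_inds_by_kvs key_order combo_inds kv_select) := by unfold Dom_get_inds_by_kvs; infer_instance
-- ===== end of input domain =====

-- B replaces A's sequential per-constraint filtering passes with one pass over combo_inds
-- checking all selected constraints at once (objective: simpler).


-- ===== PORT A =====
-- name_to_ind = {k: i for i, k in enumerate(key_order)}  (shared by both Pythons verbatim)
def pvNameToInd (key_order : List String) : PySem.Dict String Int :=
  (PySem.List.enumerate key_order 0).foldl (fun d p => d.insert p.2 p.1) PySem.Dict.empty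

def get_inds_by_kvs (key_order : List String) (combo_inds : List (List String × List Int)) (kv_select : List (String × String)) : List (List String × List Int) :=
  let cdict := PySem.Dict.ofList combo_inds
  let selected_rows := cdict.keys
  let name_to_ind := pvNameToInd key_order
  -- for k, v in kv_select.items(): if k not in key_order: continue; key_ind = name_to_ind[k]; selected_rows = [sr for sr in selected_rows if sr[key_ind] == v]
  -- sr[key_ind] ported as pyGetD (exact under Pre_, which puts every applied index in range)
  let selected_rows := (PySem.Dict.ofList kv_select).items.foldl
    (fun sel p =>
      if decide (p.1 ∈ key_order) then
        let key_ind := name_to_ind.getD p.1 0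
        sel.filter (fun sr => PySem.List.pyGetD sr key_ind "" == p.2)
      else sel)
    selected_rows
  selected_rows.map (fun sr => (sr, cdict.getD sr []))

-- ===== PORT B =====
def get_inds_by_kvs_alt (key_order : List String) (combo_inds : List (List String × List Int)) (kv_select : List (String × String)) : List (List String × List Int) :=
  let name_to_ind := pvNameToInd key_order
  let constraints := ((PySem.Dict.ofList kv_select).items.filter
      (fun p => name_to_ind.contains p.1)).map
      (fun p => (name_to_ind.getD p.1 0, p.2))
  (PySem.Dict.ofList combo_inds).items.filter
    (fun rv => constraints.all (fun c => PySem.List.pyGetD rv.1 c.1 "" == c.2))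

-- ===== PRECONDITION & SPEC =====
-- Pre_ excludes inputs on which a kv_select key occurring in key_order has an index that is out of
-- range for some row of combo_inds: there A raises IndexError (except when such a row is already
-- filtered away by an earlier constraint, where A still returns — slightly narrower than needed).
def Pre_get_inds_by_kvs (key_order : List String) (combo_inds : List (List String × List Int)) (kv_select : List (String × String)) : Prop :=
  ∀ p ∈ kv_select, ∀ r ∈ combo_inds, ∀ i : Nat, (hi : i < key_order.length) → key_order[i] = p.1 → i < r.1.length
instance (key_order : List String) (combo_inds : List (List String × List Int)) (kv_select : List (String × String)) : Decidable (Pre_get_inds_by_kvs key_order combo_inds kv_select) := by unfold Pre_get_inds_by_kvs; infer_instance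

def pvWitness_get_inds_by_kvs : List String × (List (List String × List Int)) × (List (String × String)) :=
  (["a", "b"], [(["x", "y"], [1]), (["p", "y"], [2, 3])], [("b", "y")])

def Spec_get_inds_by_kvs (key_order : List String) (combo_inds : List (List String × List Int)) (kv_select : List (String × String)) (out : List (List String × List Int)) : Prop := out = get_inds_by_kvs_alt key_order combo_inds kv_select
instance (key_order : List String) (combo_inds : List (List String × List Int)) (kv_select : List (String × String)) (out : List (List String × List Int)) : Decidable (Spec_get_inds_by_kvs key_order combo_inds kv_select out) := by unfold Spec_get_inds_by_kvs; infer_instance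

-- ===== CLAIM (what is proved, stated in full; the proofs are below) =====
def Claim_equal_get_inds_by_kvs : Prop := ∀ (key_order : List String) (combo_inds : List (List String × List Int)) (kv_select : List (String × String)), Dom_get_inds_by_kvs key_order combo_inds kv_select → Pre_get_inds_by_kvs key_order combo_inds kv_select → Spec_get_inds_by_kvs key_order combo_inds kv_select (get_inds_by_kvs key_order combo_inds kv_select)

-- ===== LEMMAS AND PROOFS =====

-- A's loop of filtering passes is one filter by the conjunction of the selected predicates.
theorem foldl_filter_eq_filter_all {α β : Type} (cs : List β) (cond : β → Bool) (f : β → α → Bool) (init : List α) :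
    cs.foldl (fun s c => if cond c then s.filter (f c) else s) init
      = init.filter (fun x => (cs.filter cond).all (fun c => f c x)) := by
  induction cs generalizing init with
  | nil => simp
  | cons c cs ih =>
    by_cases h : cond c = true
    · rw [List.foldl_cons, if_pos h, ih, List.filter_filter, List.filter_cons_of_pos h]
      exact List.filter_congr (fun x _ => by simp [List.all_cons, Bool.and_comm])
    · rw [List.foldl_cons, if_neg h, ih, List.filter_cons_of_neg h]

-- membership test via name_to_ind agrees with membership in key_order
theorem contains_pvNameToInd (key_order : List String) (k : String) :
    (pvNameToInd key_order).contains k = decide (k ∈ key_order) := by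
  rw [pvNameToInd, PySem.Dict.contains_eq_decide_mem_keys,
    PySem.Dict.keys_foldl_insert_key (key := fun p : Int × String => p.2)]
  simp only [PySem.Set.update, PySem.List.map_snd_enumerate]
  simp only [decide_eq_decide]
  exact PySem.Set.mem_ofList key_order k

theorem get_inds_by_kvs_spec : Claim_equal_get_inds_by_kvs := by
  intro key_order combo_inds kv_select _ _
  unfold Spec_get_inds_by_kvs
  simp only [get_inds_by_kvs, get_inds_by_kvs_alt]
  rw [foldl_filter_eq_filter_all]
  have hcond : ((PySem.Dict.ofList kv_select).items.filter
        (fun p => (pvNameToInd key_order).contains p.1))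
      = ((PySem.Dict.ofList kv_select).items.filter
        (fun p => decide (p.1 ∈ key_order))) :=
    List.filter_congr (fun p _ => contains_pvNameToInd key_order p.1)
  rw [hcond]
  set kvs := (PySem.Dict.ofList kv_select).items.filter (fun p => decide (p.1 ∈ key_order)) with hkvs
  set nm := pvNameToInd key_order with hnm
  have hB : (PySem.Dict.ofList combo_inds).items.filter
        (fun rv => (kvs.map (fun p => (nm.getD p.1 0, p.2))).all
          (fun c => PySem.List.pyGetD rv.1 c.1 "" == c.2))
      = (PySem.Dict.ofList combo_inds).items.filter
        (fun rv => kvs.all (fun p => PySem.List.pyGetD rv.1 (nm.getD p.1 0) "" == p.2)) := by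
    refine List.filter_congr (fun rv _ => ?_)
    rw [List.all_map]
    rfl
  rw [hB]
  rw [show (PySem.Dict.ofList combo_inds).keys
        = (PySem.Dict.ofList combo_inds).items.map (·.1) from rfl]
  rw [List.filter_map, List.map_map]
  have hnd : (PySem.Dict.ofList combo_inds).keys.Nodup := PySem.Dict.nodup_keys_ofList combo_inds
  have hid : ∀ rv ∈ List.filter
        ((fun x => kvs.all fun c => PySem.List.pyGetD x (nm.getD c.1 0) "" == c.2) ∘ fun x => x.1)
        (PySem.Dict.ofList combo_inds).items,
      ((fun sr => (sr, (PySem.Dict.ofList combo_inds).getD sr [])) ∘ fun x => x.1) rv = id rv := by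
    intro rv hrv
    show (rv.1, (PySem.Dict.ofList combo_inds).getD rv.1 []) = rv
    have hm : (rv.1, rv.2) ∈ (PySem.Dict.ofList combo_inds).items := by
      simpa using List.mem_of_mem_filter hrv
    rw [PySem.Dict.getD_of_mem_items (PySem.Dict.ofList combo_inds) hm hnd]
  rw [List.map_congr_left hid, List.map_id]
  rfl

-- ===== VERDICT (by name: the statement is the Claim_ definition above) =====
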